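-- pv_equiv track=rewrite | github.com/codesbya8h1/codecomprehender | code_comprehender/async_code_documenter.py | _extract_class_content
-- ===== SOURCE A (Python) =====
-- def _extract_class_content(documented_code: str) -> str:
--     """Extract class content, removing duplicate package/import headers.
--
--     Args:
--         documented_code: Documented code that may contain headers
--
--     Returns:
--         Clean class content
--     """
--     lines = documented_code.split("\n")
--     class_started = False
--     class_lines = []
--
--     for line in lines:
--         stripped = line.strip()
--
--         # Skip package and import lines at the beginning
--         if not class_started:
--             if (
--                 stripped.startswith("package ")
--                 or stripped.startswith("import ")
--                 or stripped == ""
--                 or stripped.startswith("//")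
--                 or stripped.startswith("/*")
--             ):
--                 continue
--             else:
--                 class_started = True
--
--         if class_started:
--             class_lines.append(line)
--
--     return "\n".join(class_lines)
-- ===== SOURCE B (Python) =====
-- def _is_header(line: str) -> bool:
--     stripped = line.strip()
--     return (
--         stripped.startswith("package ")
--         or stripped.startswith("import ")
--         or stripped == ""
--         or stripped.startswith("//")
--         or stripped.startswith("/*")
--     )
--
--
-- def _extract_class_content(documented_code: str) -> str:
--     # Work on the raw string: peel header lines off the front and return a
--     # suffix of the original string; no line list is built and nothing is joined.
--     rest = documented_code
--     while True:
--         cut = rest.find("\n")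
--         first = rest if cut == -1 else rest[:cut]
--         if not _is_header(first):
--             return rest
--         if cut == -1:
--             return ""
--         rest = rest[cut + 1:]
-- ===== Notes on version B (the rewrite author's own statement) =====
-- stated objective: alternative
-- what changed: B never builds a list of lines: it scans the raw string, repeatedly finding the first newline, testing the head line with a header predicate, and advancing to the suffix after it, finally returning a suffix of the original string directly with no split or join.
import Mathlib
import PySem

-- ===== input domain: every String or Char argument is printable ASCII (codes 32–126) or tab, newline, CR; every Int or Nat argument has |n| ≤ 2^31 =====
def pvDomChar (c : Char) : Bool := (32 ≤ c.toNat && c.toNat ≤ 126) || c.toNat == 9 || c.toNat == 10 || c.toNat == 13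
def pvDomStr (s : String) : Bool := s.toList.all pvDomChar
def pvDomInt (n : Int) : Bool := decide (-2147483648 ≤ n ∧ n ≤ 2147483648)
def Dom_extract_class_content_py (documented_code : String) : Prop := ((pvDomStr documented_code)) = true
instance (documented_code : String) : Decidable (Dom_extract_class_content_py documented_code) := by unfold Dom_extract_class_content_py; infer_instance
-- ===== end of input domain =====

-- B never splits the input into a line list: it scans the raw string, peeling header
-- lines off the front via find("\n"), and returns a suffix of the original string
-- with no join; objective: alternative (different traversal / data representation).

-- ===== PORT A =====
-- A's per-line step: skip header lines until class_started flips, then append every line.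
def pvStepA (st : Bool × List String) (line : String) : Bool × List String :=
  let stripped := PySem.Str.strip line
  if !st.1 &&
      (PySem.Str.startswith stripped "package " ||
       PySem.Str.startswith stripped "import " ||
       stripped == "" ||
       PySem.Str.startswith stripped "//" ||
       PySem.Str.startswith stripped "/*") then
    st
  else
    (true, st.2 ++ [line])

def extract_class_content_py (documented_code : String) : String :=
  let lines := (PySem.Str.split? documented_code "\n").getD []
  let res := lines.foldl pvStepA (false, [])
  PySem.Str.join "\n" res.2

-- ===== PORT B =====
-- Source B's _is_header, on the code points (PySem string functions are defined on List Char)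
def pvIsHeaderC (line : List Char) : Bool :=
  let stripped := PySem.Chars.strip line
  PySem.Chars.startswith stripped "package ".toList ||
  PySem.Chars.startswith stripped "import ".toList ||
  stripped == [] ||
  PySem.Chars.startswith stripped "//".toList ||
  PySem.Chars.startswith stripped "/*".toList

-- the while loop of Source B: cut = rest.find("\n"); test the head line; advance past it.
-- rest[:cut] / rest[cut+1:] with 0 ≤ cut < len(rest) are exactly take / drop (exact here).
def pvGoB (rest : List Char) : List Char :=
  let cut := PySem.Chars.find rest ['\n']
  let first := if cut == -1 then rest else rest.take cut.toNat
  if !pvIsHeaderC first then rest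
  else if h : cut = -1 then []
  else pvGoB (rest.drop (cut.toNat + 1))
termination_by rest.length
decreasing_by
  have h0 := PySem.Chars.neg_one_le_find rest ['\n']
  have h1 := PySem.Chars.find_le_length rest ['\n']
  have h2 : rest ≠ [] := by
    intro he
    subst he
    have : PySem.Chars.find ([] : List Char) ['\n'] = -1 := by decide
    exact h this
  have h3 : 0 < rest.length := List.length_pos_iff.mpr h2
  simp only [List.length_drop]
  omega

def extract_class_content_py_alt (documented_code : String) : String :=
  String.ofList (pvGoB documented_code.toList)

-- ===== PRECONDITION & SPEC =====
def Spec_extract_class_content_py (documented_code : String) (out : String) : Prop := out = extract_class_content_py_alt documented_code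
instance (documented_code : String) (out : String) : Decidable (Spec_extract_class_content_py documented_code out) := by unfold Spec_extract_class_content_py; infer_instance

-- ===== CLAIM (what is proved, stated in full; the proofs are below) =====
def Claim_equal_extract_class_content_py : Prop := ∀ (documented_code : String), Dom_extract_class_content_py documented_code → Spec_extract_class_content_py documented_code (extract_class_content_py documented_code)

-- ===== LEMMAS AND PROOFS =====

-- A's header test as a predicate on String lines (the condition inside pvStepA)
def pvIsHeader (line : String) : Bool :=
  let stripped := PySem.Str.strip line
  PySem.Str.startswith stripped "package " ||
  PySem.Str.startswith stripped "import " ||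
  stripped == "" ||
  PySem.Str.startswith stripped "//" ||
  PySem.Str.startswith stripped "/*"

-- index of the first non-header line
def pvFindStart : List String → Nat
  | [] => 0
  | l :: ls => if pvIsHeader l then pvFindStart ls + 1 else 0

def pvFindStartC : List (List Char) → Nat
  | [] => 0
  | l :: ls => if pvIsHeaderC l then pvFindStartC ls + 1 else 0

-- accumulator form of splitting on '\n'
def pvSplitAux : List Char → List Char → List (List Char)
  | pre, [] => [pre]
  | pre, c :: rest => if c = '\n' then pre :: pvSplitAux [] rest else pvSplitAux (pre ++ [c]) rest

theorem foldA_true (lines : List String) : ∀ acc : List String,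
    (lines.foldl pvStepA (true, acc)).2 = acc ++ lines := by
  induction lines with
  | nil => simp
  | cons l ls ih =>
      intro acc
      have hstep : pvStepA (true, acc) l = (true, acc ++ [l]) := by
        simp [pvStepA]
      rw [List.foldl_cons, hstep, ih (acc ++ [l])]
      simp

theorem foldA_false (lines : List String) : ∀ acc : List String,
    (lines.foldl pvStepA (false, acc)).2 = acc ++ lines.drop (pvFindStart lines) := by
  induction lines with
  | nil => simp
  | cons l ls ih =>
      intro acc
      by_cases h : pvIsHeader l = true
      · have hstep : pvStepA (false, acc) l = (false, acc) := by
          simp only [pvStepA, Bool.not_false, Bool.true_and]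
          rw [if_pos]
          simpa [pvIsHeader] using h
        rw [List.foldl_cons, hstep, ih acc]
        simp [pvFindStart, h]
      · have hstep : pvStepA (false, acc) l = (true, acc ++ [l]) := by
          simp only [pvStepA, Bool.not_false, Bool.true_and]
          rw [if_neg]
          simpa [pvIsHeader] using h
        rw [List.foldl_cons, hstep, foldA_true ls (acc ++ [l])]
        simp [pvFindStart, h]

theorem ofList_beq_empty (l : List Char) : (String.ofList l == "") = (l == []) := by
  rcases l with _ | ⟨c, t⟩
  · rfl
  · rw [show ((c :: t : List Char) == []) = false by rfl, beq_eq_false_iff_ne]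
    intro h
    have := congrArg String.toList h
    simp at this

theorem isHeader_ofList (p : List Char) : pvIsHeader (String.ofList p) = pvIsHeaderC p := by
  simp only [pvIsHeader, pvIsHeaderC, PySem.Str.strip, PySem.Str.startswith,
    String.toList_ofList, ofList_beq_empty]

theorem findStart_map_ofList (ps : List (List Char)) :
    pvFindStart (ps.map String.ofList) = pvFindStartC ps := by
  induction ps with
  | nil => rfl
  | cons p ps ih => simp [pvFindStart, pvFindStartC, isHeader_ofList, ih]

theorem splitOn_go_eq (fuel : Nat) : ∀ (l cur : List Char) (accs : List (List Char)),
    l.length < fuel →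
    PySem.Chars.splitOn.go ['\n'] fuel l cur accs = accs.reverse ++ pvSplitAux cur.reverse l := by
  induction fuel with
  | zero => intro l cur accs h; omega
  | succ fuel ih =>
      intro l cur accs h
      cases l with
      | nil => simp [PySem.Chars.splitOn.go, pvSplitAux]
      | cons c rest =>
          simp only [PySem.Chars.splitOn.go]
          by_cases hc : c = '\n'
          · subst hc
            rw [if_pos (by simp [List.isPrefixOf])]
            simp only [List.length_cons] at h
            rw [ih _ _ _ (by simp; omega)]
            simp [pvSplitAux]
          · rw [if_neg (by simp [List.isPrefixOf]; intro h'; exact hc h'.symm)]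
            simp only [List.length_cons] at h
            rw [ih _ _ _ (by omega)]
            simp [pvSplitAux, hc]

theorem splitOn_eq (cs : List Char) : PySem.Chars.splitOn cs ['\n'] = pvSplitAux [] cs := by
  unfold PySem.Chars.splitOn
  rw [splitOn_go_eq _ _ _ _ (by omega)]
  rfl

theorem splitAux_ne_nil (cs : List Char) : ∀ pre, pvSplitAux pre cs ≠ [] := by
  induction cs with
  | nil => intro pre; simp [pvSplitAux]
  | cons c rest ih =>
      intro pre
      by_cases hc : c = '\n' <;> simp [pvSplitAux, hc, ih]

theorem join_cons (x : List Char) (ps : List (List Char)) (h : ps ≠ []) :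
    PySem.Chars.join ['\n'] (x :: ps) = x ++ '\n' :: PySem.Chars.join ['\n'] ps := by
  cases ps with
  | nil => exact absurd rfl h
  | cons y ps => simp [PySem.Chars.join, List.intercalate, List.intersperse]

theorem join_splitAux (cs : List Char) : ∀ pre,
    PySem.Chars.join ['\n'] (pvSplitAux pre cs) = pre ++ cs := by
  induction cs with
  | nil => intro pre; simp [pvSplitAux, PySem.Chars.join, List.intercalate]
  | cons c rest ih =>
      intro pre
      by_cases hc : c = '\n'
      · subst hc
        simp only [pvSplitAux, reduceIte]
        rw [join_cons _ _ (splitAux_ne_nil rest [])]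
        rw [ih]
        simp
      · simp only [pvSplitAux, if_neg hc]
        rw [ih]
        simp

theorem splitAux_no_nl (cs : List Char) (h : '\n' ∉ cs) : ∀ pre, pvSplitAux pre cs = [pre ++ cs] := by
  induction cs with
  | nil => simp [pvSplitAux]
  | cons c rest ih =>
      intro pre
      have hc : c ≠ '\n' := fun he => h (he ▸ List.mem_cons_self)
      simp only [pvSplitAux, if_neg hc]
      rw [ih (fun hm => h (List.mem_cons_of_mem _ hm))]
      simp

theorem splitAux_split (t : List Char) (h : '\n' ∉ t) (rest : List Char) : ∀ pre,
    pvSplitAux pre (t ++ '\n' :: rest) = (pre ++ t) :: pvSplitAux [] rest := by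
  induction t with
  | nil => simp [pvSplitAux]
  | cons c t ih =>
      intro pre
      have hc : c ≠ '\n' := fun he => h (he ▸ List.mem_cons_self)
      simp only [List.cons_append, pvSplitAux, if_neg hc]
      rw [ih (fun hm => h (List.mem_cons_of_mem _ hm))]
      simp

-- decomposition of a string at its first newline
theorem find_decomp (cs : List Char) (h : PySem.Chars.find cs ['\n'] ≠ -1) :
    let kn := (PySem.Chars.find cs ['\n']).toNat
    '\n' ∉ cs.take kn ∧ cs = cs.take kn ++ '\n' :: cs.drop (kn + 1) := by
  intro kn
  have h0 := PySem.Chars.neg_one_le_find cs ['\n']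
  have hpos : 0 ≤ PySem.Chars.find cs ['\n'] := by omega
  obtain ⟨hpre, hmin⟩ := PySem.Chars.find_spec (s := cs) (sub := ['\n']) hpos
  have hlen := PySem.Chars.find_le_length cs ['\n']
  have hknlt : kn < cs.length := by
    rcases Nat.lt_or_ge kn cs.length with h' | h'
    · exact h'
    · exfalso
      have : cs.drop kn = [] := List.drop_eq_nil_of_le h'
      rw [this] at hpre
      simp at hpre
  obtain ⟨t, ht⟩ := hpre
  have hdropkn : cs.drop kn = '\n' :: t := by simpa using ht.symm
  have htt : t = cs.drop (kn + 1) := by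
    have := congrArg List.tail hdropkn
    simpa [List.tail_drop] using this.symm
  constructor
  · intro hmem
    obtain ⟨i, hi, hgi⟩ := List.getElem_of_mem hmem
    have hik : i < kn := by simpa using (List.length_take .. ▸ hi : i < min kn cs.length).trans_le (by omega)
    have hgi' : cs[i]'(by omega) = '\n' := by
      rw [← hgi]; rw [List.getElem_take]
    apply hmin i hik
    have : cs.drop i = '\n' :: cs.drop (i+1) := by
      rw [List.drop_eq_getElem_cons (by omega), hgi']
    rw [this]
    exact ⟨_, rfl⟩
  · conv_lhs => rw [← List.take_append_drop kn cs]
    rw [hdropkn, htt]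

-- the main bridge: B's raw-string scan computes exactly the join of the dropped split
theorem goB_eq (cs : List Char) :
    pvGoB cs = PySem.Chars.join ['\n'] ((pvSplitAux [] cs).drop (pvFindStartC (pvSplitAux [] cs))) := by
  fun_induction pvGoB cs with
  | case1 rest cut first hhdr =>
      have hh : pvIsHeaderC first = false := by simpa using hhdr
      have hstart : pvFindStartC (pvSplitAux [] rest) = 0 := by
        by_cases hm : PySem.Chars.find rest ['\n'] = -1
        · have hnl : '\n' ∉ rest := by
            intro hmem
            exact ((PySem.Chars.find_eq_neg_one_iff rest ['\n']).mp hm)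
              ((List.singleton_infix_iff _ _).mpr hmem)
          have hfst : first = rest := by simp [first, cut, hm]
          rw [splitAux_no_nl rest hnl []]
          simp [pvFindStartC, ← hfst, hh]
        · obtain ⟨hnt, hdec⟩ := find_decomp rest hm
          have hfst : first = rest.take (PySem.Chars.find rest ['\n']).toNat := by
            simp [first, cut, hm]
          conv_lhs => rw [hdec]
          rw [splitAux_split _ hnt _ []]
          simp [pvFindStartC, ← hfst, hh]
      rw [hstart, List.drop_zero, join_splitAux]
      simp
  | case2 rest cut first hhdr hcut =>
      have hh' : pvIsHeaderC first = true := by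
        cases hX : pvIsHeaderC first
        · rw [hX] at hhdr; simp at hhdr
        · rfl
      have hnl : '\n' ∉ rest := by
        intro hmem
        exact ((PySem.Chars.find_eq_neg_one_iff rest ['\n']).mp hcut)
          ((List.singleton_infix_iff _ _).mpr hmem)
      have hfst : first = rest := by simp [first, cut, hcut]
      rw [splitAux_no_nl rest hnl []]
      simp [pvFindStartC, ← hfst, hh']
  | case3 rest cut first hhdr hcut ih =>
      have hh' : pvIsHeaderC first = true := by
        cases hX : pvIsHeaderC first
        · rw [hX] at hhdr; simp at hhdr
        · rfl
      obtain ⟨hnt, hdec⟩ := find_decomp rest hcut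
      have hfst : first = rest.take (PySem.Chars.find rest ['\n']).toNat := by
        simp [first, cut, hcut]
      conv_rhs => rw [hdec]
      rw [splitAux_split _ hnt _ []]
      simp only [pvFindStartC, List.nil_append, ← hfst, hh', if_pos, List.drop_succ_cons]
      exact ih

-- ===== VERDICT (by name: the statement is the Claim_ definition above) =====
theorem extract_class_content_py_spec : Claim_equal_extract_class_content_py := by
  intro s _
  unfold Spec_extract_class_content_py extract_class_content_py extract_class_content_py_alt
  have hsplit : (PySem.Str.split? s "\n").getD []
      = (pvSplitAux [] s.toList).map String.ofList := by
    simp [PySem.Str.split?, PySem.Chars.split?, splitOn_eq]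
  show PySem.Str.join "\n"
      (List.foldl pvStepA (false, []) ((PySem.Str.split? s "\n").getD [])).2
      = String.ofList (pvGoB s.toList)
  rw [hsplit, foldA_false _ [], List.nil_append, findStart_map_ofList, ← List.map_drop,
    goB_eq]
  simp only [PySem.Str.join]
  congr 1
  have hmap : List.map (String.toList ∘ String.ofList) (pvSplitAux [] s.toList)
      = pvSplitAux [] s.toList := by
    simp [Function.comp_def]
  simp [PySem.Chars.join, hmap]
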